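-- pv_equiv track=rewrite | github.com/shane0lin/alg101 | misc/geico/unique-number.py | unique_towers
-- ===== SOURCE A (Python) =====
-- def unique_towers(heights):
--     # Sort by max height, keeping original index
--     indexed = sorted(enumerate(heights), key=lambda x: x[1])
--     result = [0] * len(heights)
--
--     for rank, (orig_idx, max_h) in enumerate(indexed, 1):
--         if max_h < rank:
--             return None  # impossible
--         result[orig_idx] = rank
--
--     return result
-- ===== SOURCE B (Python) =====
-- def unique_towers(heights):
--     # Comparison counting instead of sorting: rank(i) = 1 + #{j: h[j] < h[i]} + #{j < i: h[j] == h[i]},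
--     # which is exactly the 1-based position of element i in the stable sort by height.
--     result = []
--     for i, h in enumerate(heights):
--         rank = 1
--         for j, x in enumerate(heights):
--             if x < h or (x == h and j < i):
--                 rank += 1
--         if h < rank:
--             return None
--         result.append(rank)
--     return result
-- ===== Notes on version B (the rewrite author's own statement) =====
-- stated objective: alternative
-- what changed: Replaces sort-then-scatter (stable sort of (index,height), rank by sorted position, write into a preallocated array) with direct comparison counting: each element's rank is computed as 1 + number of strictly smaller heights + number of equal heights at earlier indices, with no sort and no index scatter.
import Mathlib
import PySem

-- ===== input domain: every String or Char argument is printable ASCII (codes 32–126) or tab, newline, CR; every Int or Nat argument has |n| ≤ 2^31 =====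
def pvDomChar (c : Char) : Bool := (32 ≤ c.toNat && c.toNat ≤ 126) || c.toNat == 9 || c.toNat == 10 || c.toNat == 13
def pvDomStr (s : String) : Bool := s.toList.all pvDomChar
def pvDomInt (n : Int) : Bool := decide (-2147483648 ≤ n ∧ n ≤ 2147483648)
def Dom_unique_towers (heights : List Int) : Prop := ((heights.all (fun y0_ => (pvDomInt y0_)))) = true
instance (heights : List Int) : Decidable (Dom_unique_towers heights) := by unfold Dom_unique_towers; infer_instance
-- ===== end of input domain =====

-- B replaces A's stable sort + scatter-by-index with direct per-index comparison counting (same values, no speed claim).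

-- ===== PORT A =====
-- the loop 'for rank, (orig_idx, max_h) in enumerate(indexed, 1): …'; orig_idx comes from
-- enumerate, so it is always a nonnegative in-range index (toNat is exact here)
def uA_loop : List (Int × Int) → Int → List Int → Option (List Int)
  | [], _, res => some res
  | (oi, h) :: rest, rank, res =>
      if h < rank then none
      else uA_loop rest (rank + 1) (res.set oi.toNat rank)

def unique_towers (heights : List Int) : Option (List Int) :=
  uA_loop (PySem.List.sorted (PySem.List.enumerate heights 0) (fun x => x.2)) 1
    (List.replicate heights.length 0)

-- ===== PORT B =====
-- inner loop 'for j, x in enumerate(heights): if x < h or (x == h and j < i): rank += 1'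
def uB_rank (heights : List Int) (i h : Int) : Int :=
  (PySem.List.enumerate heights 0).foldl
    (fun r q => if q.2 < h ∨ (q.2 = h ∧ q.1 < i) then r + 1 else r) 1

def uB_loop (hs : List Int) : List (Int × Int) → List Int → Option (List Int)
  | [], acc => some acc
  | (i, h) :: rest, acc =>
      let rank := uB_rank hs i h
      if h < rank then none else uB_loop hs rest (acc ++ [rank])

def unique_towers_alt (heights : List Int) : Option (List Int) :=
  uB_loop heights (PySem.List.enumerate heights 0) []

-- ===== PRECONDITION & SPEC =====
def Spec_unique_towers (heights : List Int) (out : Option (List Int)) : Prop := out = unique_towers_alt heights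
instance (heights : List Int) (out : Option (List Int)) : Decidable (Spec_unique_towers heights out) := by unfold Spec_unique_towers; infer_instance

-- ===== CLAIM (what is proved, stated in full; the proofs are below) =====
def Claim_equal_unique_towers : Prop := ∀ (heights : List Int), Dom_unique_towers heights → Spec_unique_towers heights (unique_towers heights)

-- ===== LEMMAS AND PROOFS =====

-- strict "stable-sort order": q comes strictly before p in the stable sort by snd
def kltb (q p : Int × Int) : Bool := q.2 < p.2 || (q.2 == p.2 && q.1 < p.1)

theorem kltb_irrefl (p : Int × Int) : kltb p p = false := by
  simp [kltb]

theorem kltb_asymm {a b : Int × Int} (h : kltb a b = true) : kltb b a = false := by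
  simp only [kltb, Bool.or_eq_true, Bool.and_eq_true, decide_eq_true_eq, beq_iff_eq,
    Bool.or_eq_false_iff, Bool.and_eq_false_iff, decide_eq_false_iff_not, beq_eq_false_iff_ne] at *
  omega

-- result of A's loop without the feasibility check
def applyRanks : List (Int × Int) → Int → List Int → List Int
  | [], _, res => res
  | (oi, _) :: rest, rank, res => applyRanks rest (rank + 1) (res.set oi.toNat rank)

theorem uA_loop_eq (S : List (Int × Int)) : ∀ (r : Int) (res : List Int),
    uA_loop S r res =
      if (PySem.List.enumerate S r).any (fun q => decide (q.2.2 < q.1)) then none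
      else some (applyRanks S r res) := by
  induction S with
  | nil => intro r res; simp [uA_loop, applyRanks, PySem.List.enumerate_nil]
  | cons p rest ih =>
    intro r res
    obtain ⟨oi, h⟩ := p
    simp only [uA_loop, PySem.List.enumerate_cons, List.any_cons, applyRanks]
    by_cases hlt : h < r
    · simp [hlt]
    · rw [ih]
      have hd : decide (h < r) = false := by simp [hlt]
      rw [hd, Bool.false_or, if_neg hlt]

theorem uB_loop_eq (hs : List Int) (l : List (Int × Int)) : ∀ (acc : List Int),
    uB_loop hs l acc =
      if l.any (fun q => decide (q.2 < uB_rank hs q.1 q.2)) then none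
      else some (acc ++ l.map (fun q => uB_rank hs q.1 q.2)) := by
  induction l with
  | nil => intro acc; simp [uB_loop]
  | cons p rest ih =>
    intro acc
    obtain ⟨i, h⟩ := p
    simp only [uB_loop, List.any_cons, List.map_cons]
    by_cases hlt : h < uB_rank hs i h
    · simp [hlt]
    · rw [ih, List.append_assoc]
      have hd : decide (h < uB_rank hs i h) = false := by simp [hlt]
      rw [hd, Bool.false_or, if_neg hlt, List.singleton_append]

theorem uB_rank_foldl (i h : Int) (l : List (Int × Int)) : ∀ (c : Int),
    l.foldl (fun r q => if q.2 < h ∨ (q.2 = h ∧ q.1 < i) then r + 1 else r) c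
      = c + l.countP (fun q => kltb q (i, h)) := by
  induction l with
  | nil => intro c; simp
  | cons q rest ih =>
    intro c
    have hiff : (q.2 < h ∨ (q.2 = h ∧ q.1 < i)) ↔ kltb q (i, h) = true := by
      simp [kltb]
    by_cases hq : q.2 < h ∨ (q.2 = h ∧ q.1 < i)
    · simp only [List.foldl_cons, if_pos hq, ih, List.countP_cons, hiff.mp hq]
      push_cast; ring
    · have hkf : kltb q (i, h) = false := by
        rw [← Bool.not_eq_true]; exact fun hc => hq (hiff.mpr hc)
      simp only [List.foldl_cons, if_neg hq, ih, List.countP_cons, hkf]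
      simp
theorem uB_rank_eq (hs : List Int) (i h : Int) :
    uB_rank hs i h = 1 + (PySem.List.enumerate hs 0).countP (fun q => kltb q (i, h)) := by
  simp [uB_rank, uB_rank_foldl]

-- inserting an element whose fst is larger than every fst already present keeps kltb-sortedness
theorem insertBy_pairwise (x : Int × Int) (ys : List (Int × Int))
    (hys : ys.Pairwise (fun a b => kltb a b = true)) (hx : ∀ y ∈ ys, y.1 < x.1) :
    (PySem.List.insertBy (fun a b => decide (a.2 < b.2)) x ys).Pairwise
      (fun a b => kltb a b = true) := by
  induction ys with
  | nil => simp [PySem.List.insertBy]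
  | cons y ys ih =>
    rw [List.pairwise_cons] at hys
    by_cases hb : (decide (x.2 < y.2) : Bool) = true
    · simp only [PySem.List.insertBy, hb, if_true]
      have hxy : x.2 < y.2 := by simpa using hb
      constructor
      · intro z hz
        rcases List.mem_cons.mp hz with rfl | hz
        · simp only [kltb, Bool.or_eq_true, decide_eq_true_eq]
          left; exact hxy
        · have := hys.1 z hz
          simp only [kltb, Bool.or_eq_true, Bool.and_eq_true, decide_eq_true_eq,
            beq_iff_eq] at this ⊢
          omega
      · exact List.pairwise_cons.mpr hys
    · simp only [PySem.List.insertBy, hb]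
      constructor
      · intro z hz
        rcases (PySem.List.mem_insertBy _ _ _ _).mp hz with rfl | hz
        · have h1 : y.2 ≤ z.2 := by simpa using hb
          have h2 : y.1 < z.1 := hx y List.mem_cons_self
          simp only [kltb, Bool.or_eq_true, Bool.and_eq_true, decide_eq_true_eq, beq_iff_eq]
          omega
        · exact hys.1 z hz
      · exact ih hys.2 (fun w hw => hx w (List.mem_cons_of_mem _ hw))

theorem foldl_insertBy_pairwise : ∀ (l acc : List (Int × Int)),
    acc.Pairwise (fun a b => kltb a b = true) →
    (∀ a ∈ acc, ∀ b ∈ l, a.1 < b.1) →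
    l.Pairwise (fun p q => p.1 < q.1) →
    (l.foldl (fun acc x => PySem.List.insertBy (fun a b => decide (a.2 < b.2)) x acc) acc).Pairwise
      (fun a b => kltb a b = true) := by
  intro l
  induction l with
  | nil => intro acc h _ _; simpa using h
  | cons x rest ih =>
    intro acc hacc hcross hl
    rw [List.pairwise_cons] at hl
    simp only [List.foldl_cons]
    apply ih
    · exact insertBy_pairwise x acc hacc (fun y hy => hcross y hy x List.mem_cons_self)
    · intro a ha b hb
      rcases (PySem.List.mem_insertBy _ _ _ _).mp ha with rfl | ha
      · exact hl.1 b hb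
      · exact hcross a ha b (List.mem_cons_of_mem _ hb)
    · exact hl.2

theorem sorted_enum_pairwise (hs : List Int) :
    (PySem.List.sorted (PySem.List.enumerate hs 0) (fun x => x.2)).Pairwise
      (fun a b => kltb a b = true) := by
  rw [PySem.List.sorted_eq_foldl_insertBy]
  exact foldl_insertBy_pairwise _ [] (by simp) (by simp)
    (PySem.List.pairwise_lt_enumerate hs 0)

-- in a kltb-sorted list, the number of elements kltb-below the k-th element is k
theorem countP_pos {S : List (Int × Int)}
    (hS : S.Pairwise (fun a b => kltb a b = true)) (k : Nat) (hk : k < S.length) :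
    S.countP (fun q => kltb q S[k]) = k := by
  have hget := List.pairwise_iff_getElem.mp hS
  obtain ⟨p, hp⟩ : ∃ p, S[k] = p := ⟨S[k], rfl⟩
  rw [hp]
  conv_lhs => rw [← List.take_append_drop k S]
  rw [List.countP_append]
  have h1 : (S.take k).countP (fun q => kltb q p) = (S.take k).length := by
    apply List.countP_eq_length.mpr
    intro x hx
    obtain ⟨j, hj, hxj⟩ := List.mem_iff_getElem.mp hx
    have hjk : j < k := by
      simp only [List.length_take] at hj; omega
    rw [← hxj, List.getElem_take, ← hp]
    exact hget j k (by omega) hk hjk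
  have h2 : (S.drop k).countP (fun q => kltb q p) = 0 := by
    apply List.countP_eq_zero.mpr
    intro x hx
    obtain ⟨j, hj, hxj⟩ := List.mem_iff_getElem.mp hx
    rw [← hxj, List.getElem_drop, ← hp]
    rcases Nat.eq_zero_or_pos j with rfl | hj0
    · simp only [Nat.add_zero]
      rw [hp]
      simpa using kltb_irrefl p
    · have hkj : k + j < S.length := by
        simp only [List.length_drop] at hj; omega
      have : kltb S[k] S[k + j] = true := hget k (k + j) hk hkj (by omega)
      simpa using kltb_asymm this
  rw [h1, h2, List.length_take]
  omega

theorem length_applyRanks : ∀ (S : List (Int × Int)) (r : Int) (res : List Int),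
    (applyRanks S r res).length = res.length := by
  intro S
  induction S with
  | nil => intro r res; simp [applyRanks]
  | cons p rest ih => intro r res; obtain ⟨oi, h⟩ := p; simp [applyRanks, ih]

theorem applyRanks_get_notmem : ∀ (S : List (Int × Int)) (r : Int) (res : List Int) (m : Nat),
    ((m : Int) ∉ S.map Prod.fst) → (∀ q ∈ S, 0 ≤ q.1) →
    (applyRanks S r res)[m]? = res[m]? := by
  intro S
  induction S with
  | nil => intro r res m _ _; simp [applyRanks]
  | cons p rest ih =>
    intro r res m hnm hpos
    obtain ⟨oi, h⟩ := p
    simp only [List.map_cons, List.mem_cons, not_or] at hnm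
    have hoi : 0 ≤ oi := hpos (oi, h) List.mem_cons_self
    have hne : oi.toNat ≠ m := by
      intro hc
      apply hnm.1
      omega
    simp only [applyRanks]
    rw [ih (r + 1) _ m hnm.2 (fun q hq => hpos q (List.mem_cons_of_mem _ hq))]
    exact List.getElem?_set_ne hne

theorem applyRanks_get : ∀ (S : List (Int × Int)) (r : Int) (res : List Int) (k : Nat)
    (hk : k < S.length) (m : Nat),
    ((S.map Prod.fst).Nodup) → (∀ q ∈ S, 0 ≤ q.1) → S[k].1 = (m : Int) → m < res.length →
    (applyRanks S r res)[m]? = some (r + k) := by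
  intro S
  induction S with
  | nil => intro r res k hk; simp at hk
  | cons p rest ih =>
    intro r res k hk m hnd hpos hfst hm
    obtain ⟨oi, h⟩ := p
    simp only [List.map_cons, List.nodup_cons] at hnd
    cases k with
    | zero =>
      have hoim : oi = (m : Int) := by simpa using hfst
      simp only [applyRanks]
      rw [applyRanks_get_notmem rest (r + 1) _ m (hoim ▸ hnd.1)
        (fun q hq => hpos q (List.mem_cons_of_mem _ hq))]
      have hnat : oi.toNat = m := by omega
      rw [hnat]
      simpa using List.getElem?_set_self (by simpa using hm)
    | succ k' =>
      have hk' : k' < rest.length := by simp only [List.length_cons] at hk; omega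
      simp only [applyRanks]
      have hrest : rest[k'].1 = (m : Int) := by simpa using hfst
      rw [ih (r + 1) _ k' hk' m hnd.2
        (fun q hq => hpos q (List.mem_cons_of_mem _ hq)) hrest (by simpa using hm)]
      congr 1
      push_cast
      ring

theorem unique_towers_main (heights : List Int) :
    unique_towers heights = unique_towers_alt heights := by
  set E := PySem.List.enumerate heights 0 with hE
  set S := PySem.List.sorted E (fun x => x.2) with hS
  have hperm : S.Perm E := PySem.List.sorted_perm E (fun x => x.2) false
  have hpw : S.Pairwise (fun a b => kltb a b = true) := sorted_enum_pairwise heights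
  have hlenE : E.length = heights.length := PySem.List.length_enumerate heights 0
  have hlenS : S.length = heights.length := by rw [hperm.length_eq, hlenE]
  have hmemE : ∀ q ∈ E, ∃ (k : Nat) (hk : k < heights.length), q = ((k : Int), heights[k]) := by
    intro q hq
    obtain ⟨k, hk, hqe⟩ := (PySem.List.mem_enumerate_iff _ _ _).mp hq
    exact ⟨k, hk, by simpa using hqe⟩
  have hposE : ∀ q ∈ E, 0 ≤ q.1 := by
    intro q hq; obtain ⟨k, hk, rfl⟩ := hmemE q hq; simp
  have hposS : ∀ q ∈ S, 0 ≤ q.1 := fun q hq => hposE q (hperm.mem_iff.mp hq)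
  have hndE : (E.map Prod.fst).Nodup :=
    ((PySem.List.pairwise_lt_enumerate heights 0).map Prod.fst (fun a b h => h)).imp
      (fun h => ne_of_lt h)
  have hndS : (S.map Prod.fst).Nodup := (hperm.map Prod.fst).nodup_iff.mpr hndE
  -- rank of the k-th sorted element is k+1 = B's comparison count
  have hcnt : ∀ (k : Nat) (hk : k < S.length), E.countP (fun q => kltb q S[k]) = k := by
    intro k hk
    rw [← hperm.countP_eq]
    exact countP_pos hpw k hk
  have hrankS : ∀ (k : Nat) (hk : k < S.length),
      uB_rank heights S[k].1 S[k].2 = 1 + (k : Int) := by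
    intro k hk
    rw [uB_rank_eq]
    have : ((S[k].1, S[k].2) : Int × Int) = S[k] := rfl
    rw [this, ← hE, hcnt k hk]
  rw [show unique_towers heights = uA_loop S 1 (List.replicate heights.length 0) from rfl,
    show unique_towers_alt heights = uB_loop heights E [] from rfl,
    uA_loop_eq, uB_loop_eq]
  -- the two feasibility checks agree
  have hcond : (PySem.List.enumerate S 1).any (fun q => decide (q.2.2 < q.1))
      = E.any (fun q => decide (q.2 < uB_rank heights q.1 q.2)) := by
    apply Bool.eq_iff_iff.mpr
    constructor
    · intro hA
      rw [List.any_eq_true] at hA ⊢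
      obtain ⟨q, hqe, hq⟩ := hA
      obtain ⟨k, hk, hqk⟩ := (PySem.List.mem_enumerate_iff _ _ _).mp hqe
      have hkS : k < S.length := by simpa using hk
      refine ⟨S[k], hperm.mem_iff.mp (S.getElem_mem hkS), ?_⟩
      simp only [decide_eq_true_eq] at hq ⊢
      rw [hrankS k hkS]
      rw [hqk] at hq
      simpa using hq
    · intro hB
      rw [List.any_eq_true] at hB ⊢
      obtain ⟨q, hqE, hq⟩ := hB
      obtain ⟨k, hk, hSk⟩ := List.mem_iff_getElem.mp (hperm.mem_iff.mpr hqE)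
      refine ⟨(1 + (k : Int), S[k]), (PySem.List.mem_enumerate_iff _ _ _).mpr ⟨k, hk, rfl⟩, ?_⟩
      simp only [decide_eq_true_eq] at hq ⊢
      have hr := hrankS k hk
      rw [hSk] at hr
      rw [hr] at hq
      rw [hSk]
      exact hq
  rw [hcond]
  rcases Bool.eq_false_or_eq_true (E.any (fun q => decide (q.2 < uB_rank heights q.1 q.2))) with hB | hB
  · -- infeasible: both return None
    rw [hB]
    rfl
  · -- feasible: the scattered rank array equals B's per-index rank list
    rw [hB, if_neg (by simp), if_neg (by simp), List.nil_append]
    refine congrArg some (List.ext_getElem? fun m => ?_)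
    by_cases hm : m < heights.length
    · have hmE : ((m : Int), heights[m]) ∈ E :=
        (PySem.List.mem_enumerate_iff _ _ _).mpr ⟨m, hm, by simp⟩
      obtain ⟨k, hk, hSk⟩ := List.mem_iff_getElem.mp (hperm.mem_iff.mpr hmE)
      have hL : (applyRanks S 1 (List.replicate heights.length 0))[m]? = some (1 + (k : Int)) :=
        applyRanks_get S 1 _ k hk m hndS hposS (by rw [hSk]) (by simpa using hm)
      have hR : (E.map (fun q => uB_rank heights q.1 q.2))[m]? = some (1 + (k : Int)) := by
        rw [List.getElem?_map, hE, PySem.List.getElem?_enumerate,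
          List.getElem?_eq_getElem hm]
        simp only [Option.map_some]
        have hr := hrankS k hk
        rw [hSk] at hr
        simpa using hr
      rw [hL, hR]
    · rw [List.getElem?_eq_none (by rw [length_applyRanks]; simpa using Nat.le_of_not_lt hm),
        List.getElem?_eq_none (by rw [List.length_map, hlenE]; exact Nat.le_of_not_lt hm)]

-- ===== VERDICT (by name: the statement is the Claim_ definition above) =====
theorem unique_towers_spec : Claim_equal_unique_towers := by
  intro heights _
  unfold Spec_unique_towers
  exact unique_towers_main heights
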